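-- pv_equiv track=rewrite | github.com/LuckyTW/linux-test | plugins/ds/validators/basic_command_validator.py | _parse_responses
-- ===== SOURCE A (Python) =====
-- from typing import Dict, Any, Optional, List
--
-- def _parse_responses(stdout: str) -> List[str]:
--     """REPL stdout에서 프롬프트를 제거하고 응답만 추출
--
--     "mini-redis> OK" → "OK"
--     "mini-redis> \"Alice\"" → "\"Alice\""
--     여러 줄 응답(INFO memory 등)은 하나로 합침
--     """
--     responses = []
--     lines = stdout.split("\n")
--     current_response_lines = []
--
--     for line in lines:
--         if "mini-redis>" in line:
--             # 이전 멀티라인 응답이 있으면 저장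
--             if current_response_lines:
--                 responses.append("\n".join(current_response_lines))
--                 current_response_lines = []
--
--             # 프롬프트 이후 텍스트 추출
--             after_prompt = line.split("mini-redis>", 1)[1].strip()
--             if after_prompt:
--                 current_response_lines.append(after_prompt)
--         elif line.strip():
--             # 프롬프트 없는 줄 (멀티라인 응답의 일부)
--             current_response_lines.append(line.strip())
--
--     # 마지막 응답 저장
--     if current_response_lines:
--         responses.append("\n".join(current_response_lines))
--
--     return responses
-- ===== SOURCE B (Python) =====
-- def _parse_responses(stdout: str):
--     """Two-phase: first group raw lines into segments (a new segment starts at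
--     each prompt line, whose text is replaced by what follows the prompt), then
--     clean each segment and keep the non-empty ones."""
--     segments = [[]]
--     for line in stdout.split("\n"):
--         if "mini-redis>" in line:
--             segments.append([line.split("mini-redis>", 1)[1]])
--         else:
--             segments[-1].append(line)
--     cleaned = ["\n".join(t for t in (l.strip() for l in seg) if t) for seg in segments]
--     return [c for c in cleaned if c]
-- ===== Notes on version B (the rewrite author's own statement) =====
-- stated objective: alternative
-- what changed: Replaced the single stateful loop that interleaves stripping, emptiness tests and flush-on-prompt with a two-phase pass: first group raw lines into segments (one per prompt plus a leading segment), then clean/join each segment and filter out the empty ones.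
import Mathlib
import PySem

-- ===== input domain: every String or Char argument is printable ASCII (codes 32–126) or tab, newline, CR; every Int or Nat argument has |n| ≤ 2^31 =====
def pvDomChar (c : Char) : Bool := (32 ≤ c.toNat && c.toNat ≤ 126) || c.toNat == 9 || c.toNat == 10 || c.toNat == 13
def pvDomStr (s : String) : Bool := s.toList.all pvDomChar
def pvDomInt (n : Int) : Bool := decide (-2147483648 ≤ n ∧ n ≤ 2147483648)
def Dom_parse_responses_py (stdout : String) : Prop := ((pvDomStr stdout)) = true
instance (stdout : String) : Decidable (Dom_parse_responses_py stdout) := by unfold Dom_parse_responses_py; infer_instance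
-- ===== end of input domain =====

-- B replaces A's stateful flush-on-prompt accumulator with a two-phase group-then-clean pass (alternative decomposition, same cost).

-- ===== PORT A =====
-- line.split("mini-redis>", 1)[1]  (both Pythons contain this exact expression; the
-- index 1 always exists on the guarded branch, so the .getD defaults are unreachable)
def pvAfterPrompt (line : String) : String :=
  ((PySem.Str.splitMax? line "mini-redis>" 1).getD []).getD 1 ""

-- the body of A's for-loop, one line at a time (state = (responses, current_response_lines))
def pvStepA (st : List String × List String) (line : String) : List String × List String :=
  if PySem.Str.isIn "mini-redis>" line then
    let st1 := if st.2 ≠ [] then (st.1 ++ [PySem.Str.join "\n" st.2], ([] : List String)) else st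
    let after_prompt := PySem.Str.strip (pvAfterPrompt line)
    if after_prompt ≠ "" then (st1.1, st1.2 ++ [after_prompt]) else st1
  else if PySem.Str.strip line ≠ "" then (st.1, st.2 ++ [PySem.Str.strip line]) else st

def parse_responses_py (stdout : String) : List String :=
  let lines := (PySem.Str.split? stdout "\n").getD []
  let st := lines.foldl pvStepA (([] : List String), ([] : List String))
  if st.2 ≠ [] then st.1 ++ [PySem.Str.join "\n" st.2] else st.1

-- ===== PORT B =====
-- phase 1 body: segments = [[]]; append a fresh segment at each prompt line, else extend the last
def pvStepB (seg : List (List String) × List String) (line : String) : List (List String) × List String :=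
  if PySem.Str.isIn "mini-redis>" line then (seg.1 ++ [seg.2], [pvAfterPrompt line])
  else (seg.1, seg.2 ++ [line])

def parse_responses_py_alt (stdout : String) : List String :=
  let lines := (PySem.Str.split? stdout "\n").getD []
  let seg := lines.foldl pvStepB (([] : List (List String)), ([] : List String))
  let segments := seg.1 ++ [seg.2]
  -- phase 2: clean each segment, keep the non-empty results
  let cleaned := segments.map (fun s =>
    PySem.Str.join "\n" ((s.map PySem.Str.strip).filter (fun t => t ≠ "")))
  cleaned.filter (fun c => c ≠ "")

-- ===== PRECONDITION & SPEC =====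
def Spec_parse_responses_py (stdout : String) (out : List String) : Prop := out = parse_responses_py_alt stdout
instance (stdout : String) (out : List String) : Decidable (Spec_parse_responses_py stdout out) := by unfold Spec_parse_responses_py; infer_instance

-- ===== CLAIM (what is proved, stated in full; the proofs are below) =====
def Claim_equal_parse_responses_py : Prop := ∀ (stdout : String), Dom_parse_responses_py stdout → Spec_parse_responses_py stdout (parse_responses_py stdout)

-- ===== LEMMAS AND PROOFS =====

-- clean of one segment, as B computes it
def pvClean (s : List String) : String :=
  PySem.Str.join "\n" ((s.map PySem.Str.strip).filter (fun t => t ≠ ""))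

-- A's current_response_lines, reconstructed from B's raw current segment
def pvCleanL (s : List String) : List String :=
  (s.map PySem.Str.strip).filter (fun t => t ≠ "")

lemma pvJoin_ne_empty (x : String) (rest : List String) (hx : x ≠ "") :
    PySem.Str.join "\n" (x :: rest) ≠ "" := by
  intro hn
  have h1 : (PySem.Str.join "\n" (x :: rest)).toList = [] := by rw [hn]; rfl
  rw [PySem.Str.toList_join] at h1
  cases rest with
  | nil => simp [PySem.Chars.join_singleton] at h1; exact hx h1
  | cons b tl => rw [List.map_cons, List.map_cons, PySem.Chars.join_cons_cons] at h1; simp at h1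

lemma pvClean_eq_empty_iff (s : List String) : pvClean s = "" ↔ pvCleanL s = [] := by
  constructor
  · intro h
    by_contra hne
    match hL : pvCleanL s with
    | [] => exact hne hL
    | x :: rest =>
      have hx : x ≠ "" := by
        have : x ∈ (s.map PySem.Str.strip).filter (fun t => t ≠ "") := by
          rw [show (s.map PySem.Str.strip).filter (fun t => t ≠ "") = pvCleanL s from rfl, hL]
          exact List.mem_cons_self
        simpa using (List.of_mem_filter this)
      exact pvJoin_ne_empty x rest hx (by rw [show pvClean s = PySem.Str.join "\n" (pvCleanL s) from rfl, hL] at h; exact h)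
  · intro h
    rw [show pvClean s = PySem.Str.join "\n" (pvCleanL s) from rfl, h]
    rfl

lemma pvCleanL_append (s : List String) (l : String) :
    pvCleanL (s ++ [l]) =
      if PySem.Str.strip l ≠ "" then pvCleanL s ++ [PySem.Str.strip l] else pvCleanL s := by
  simp only [pvCleanL, List.map_append, List.map_cons, List.map_nil, List.filter_append]
  split_ifs with h
  · simp [h]
  · simp at h; simp [h]

lemma pvFilterClean_append (done : List (List String)) (cur : List String) :
    ((done ++ [cur]).map pvClean).filter (fun c => c ≠ "") =
      (done.map pvClean).filter (fun c => c ≠ "") ++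
        (if pvCleanL cur ≠ [] then [PySem.Str.join "\n" (pvCleanL cur)] else []) := by
  simp only [List.map_append, List.map_cons, List.map_nil, List.filter_append]
  congr 1
  by_cases h : pvCleanL cur = []
  · simp [h, List.filter, (pvClean_eq_empty_iff cur).mpr h]
  · have : pvClean cur ≠ "" := fun hc => h ((pvClean_eq_empty_iff cur).mp hc)
    simp [h, List.filter, this]
    rfl

lemma pvCleanL_singleton (l : String) :
    pvCleanL [l] = if PySem.Str.strip l ≠ "" then [PySem.Str.strip l] else [] := by
  simp only [pvCleanL, List.map_cons, List.map_nil, List.filter]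
  split_ifs with h
  · simp [h]
  · simp at h; simp [h]

lemma pvStepA_prompt (done : List (List String)) (cur : List String) (line : String)
    (hp : PySem.Str.isIn "mini-redis>" line = true) :
    pvStepA ((done.map pvClean).filter (fun c => c ≠ ""), pvCleanL cur) line =
      (((done ++ [cur]).map pvClean).filter (fun c => c ≠ ""), pvCleanL [pvAfterPrompt line]) := by
  unfold pvStepA
  rw [pvFilterClean_append, pvCleanL_singleton]
  simp only [hp, if_true]
  by_cases hc : pvCleanL cur = [] <;> by_cases ha : PySem.Str.strip (pvAfterPrompt line) = "" <;>
    simp [hc, ha]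

lemma pvStepA_other (R : List String) (cur : List String) (line : String)
    (hp : PySem.Str.isIn "mini-redis>" line = false) :
    pvStepA (R, pvCleanL cur) line = (R, pvCleanL (cur ++ [line])) := by
  unfold pvStepA
  rw [pvCleanL_append]
  simp only [hp, Bool.false_eq_true, if_false]
  by_cases hl : PySem.Str.strip line = "" <;> simp [hl]

lemma pv_loop (lines : List String) (done : List (List String)) (cur : List String) :
    lines.foldl pvStepA ((done.map pvClean).filter (fun c => c ≠ ""), pvCleanL cur)
    =
    (((lines.foldl pvStepB (done, cur)).1.map pvClean).filter (fun c => c ≠ ""),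
     pvCleanL (lines.foldl pvStepB (done, cur)).2) := by
  induction lines generalizing done cur with
  | nil => rfl
  | cons line ls ih =>
    rw [List.foldl_cons, List.foldl_cons]
    by_cases hp : PySem.Str.isIn "mini-redis>" line = true
    · rw [pvStepA_prompt done cur line hp, ih (done ++ [cur]) [pvAfterPrompt line]]
      have hb : pvStepB (done, cur) line = (done ++ [cur], [pvAfterPrompt line]) := by
        unfold pvStepB; simp only [hp, if_true]
      rw [hb]
    · have hp' : PySem.Str.isIn "mini-redis>" line = false := by simpa using hp
      rw [pvStepA_other _ cur line hp', ih done (cur ++ [line])]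
      have hb : pvStepB (done, cur) line = (done, cur ++ [line]) := by
        unfold pvStepB; simp only [hp', Bool.false_eq_true, if_false]
      rw [hb]

theorem parse_responses_py_spec : Claim_equal_parse_responses_py := by
  intro stdout _
  unfold Spec_parse_responses_py parse_responses_py parse_responses_py_alt
  rw [show (fun s => PySem.Str.join "\n" ((s.map PySem.Str.strip).filter (fun t => t ≠ ""))) = pvClean from rfl]
  have h := pv_loop ((PySem.Str.split? stdout "\n").getD []) [] []
  have h0 : pvCleanL ([] : List String) = [] := rfl
  simp only [List.map_nil, List.filter_nil, h0] at h
  simp only [h]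
  generalize ((PySem.Str.split? stdout "\n").getD []).foldl pvStepB (([] : List (List String)), ([] : List String)) = fin
  rw [pvFilterClean_append fin.1 fin.2]
  by_cases hc : pvCleanL fin.2 = [] <;> simp [hc]
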